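-- pv_equiv track=rewrite | github.com/VladStol223/Spoons | drawing_functions/draw_logic_input_tasks.py | _month_from_typed
-- ===== SOURCE A (Python) =====
-- def _month_from_typed(typed, months_list):
--     if not typed: return None
--     t = typed.lower()
--     matches = [i for i, m in enumerate(months_list) if m.lower().startswith(t)]
--     if len(matches) == 1: return matches[0] + 1  # 1-based month
--     # exact match still OK
--     exact = [i for i, m in enumerate(months_list) if m.lower() == t]
--     if len(exact) == 1: return exact[0] + 1
--     return None
-- ===== SOURCE B (Python) =====
-- def _month_from_typed(typed, months_list):
--     if not typed:
--         return None
--     t = typed.lower()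
--     # trie-style narrowing: walk the typed characters, keeping only the
--     # candidate months whose lowered name agrees at each position
--     cands = [(i, m.lower()) for i, m in enumerate(months_list)]
--     for pos, ch in enumerate(t):
--         cands = [(i, ml) for i, ml in cands if pos < len(ml) and ml[pos] == ch]
--     if len(cands) == 1:
--         return cands[0][0] + 1  # 1-based month
--     # exact match = a surviving candidate of exactly the typed length
--     exact = [(i, ml) for i, ml in cands if len(ml) == len(t)]
--     if len(exact) == 1:
--         return exact[0][0] + 1
--     return None
-- ===== Notes on version B (the rewrite author's own statement) =====
-- stated objective: alternative
-- what changed: Replaced A's two whole-string comprehensions (prefix-match collection, then exact-match collection) by trie-style narrowing: one walk over the typed characters that successively filters a candidate (index, lowered-month) set by agreement at each position, the unique survivor giving the prefix answer and survivors of exactly the typed length giving the exact fallback.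
import Mathlib
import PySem

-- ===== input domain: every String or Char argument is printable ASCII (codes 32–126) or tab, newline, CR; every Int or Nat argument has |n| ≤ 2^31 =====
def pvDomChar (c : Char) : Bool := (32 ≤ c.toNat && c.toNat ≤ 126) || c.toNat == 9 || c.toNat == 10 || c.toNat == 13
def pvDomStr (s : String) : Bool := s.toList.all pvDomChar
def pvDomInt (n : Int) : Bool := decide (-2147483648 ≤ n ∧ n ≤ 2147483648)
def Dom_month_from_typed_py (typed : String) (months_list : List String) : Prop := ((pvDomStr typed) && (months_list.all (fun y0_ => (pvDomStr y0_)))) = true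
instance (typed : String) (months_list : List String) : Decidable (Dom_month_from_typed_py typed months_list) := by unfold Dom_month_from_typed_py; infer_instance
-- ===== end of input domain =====

-- B replaces A's whole-string prefix/exact comprehensions by trie-style narrowing: one walk
-- over the typed characters that filters the candidate set at each position (objective:
-- alternative algorithm, same asymptotic cost).

-- ===== PORT A =====
def month_from_typed_py (typed : String) (months_list : List String) : Option Int :=
  if typed = "" then none
  else
    let t := PySem.Str.lower typed
    let matchList := ((PySem.List.enumerate months_list 0).filter
      (fun p => PySem.Str.startswith (PySem.Str.lower p.2) t)).map (·.1)
    if matchList.length = 1 then some (matchList.headD 0 + 1)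
    else
      let exact := ((PySem.List.enumerate months_list 0).filter
        (fun p => PySem.Str.lower p.2 == t)).map (·.1)
      if exact.length = 1 then some (exact.headD 0 + 1)
      else none

-- ===== PORT B =====
-- 'pos < len(ml) and ml[pos] == ch' ported exactly: bounds test, then pyGet? (pos ≥ 0 here)
def month_from_typed_py_alt (typed : String) (months_list : List String) : Option Int :=
  if typed = "" then none
  else
    let t := (PySem.Str.lower typed).toList
    let cands0 := (PySem.List.enumerate months_list 0).map
      (fun p => (p.1, (PySem.Str.lower p.2).toList))
    let cands := (PySem.List.enumerate t 0).foldl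
      (fun cs pc => cs.filter
        (fun p => decide (pc.1 < (p.2.length : Int)) && (PySem.List.pyGet? p.2 pc.1 == some pc.2)))
      cands0
    if cands.length = 1 then some ((cands.headD (0, [])).1 + 1)
    else
      let exact := cands.filter (fun p => p.2.length == t.length)
      if exact.length = 1 then some ((exact.headD (0, [])).1 + 1)
      else none

-- ===== PRECONDITION & SPEC =====
def Spec_month_from_typed_py (typed : String) (months_list : List String) (out : Option Int) : Prop := out = month_from_typed_py_alt typed months_list
instance (typed : String) (months_list : List String) (out : Option Int) : Decidable (Spec_month_from_typed_py typed months_list out) := by unfold Spec_month_from_typed_py; infer_instance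

-- ===== CLAIM (what is proved, stated in full; the proofs are below) =====
def Claim_equal_month_from_typed_py : Prop := ∀ (typed : String) (months_list : List String), Dom_month_from_typed_py typed months_list → Spec_month_from_typed_py typed months_list (month_from_typed_py typed months_list)

-- ===== LEMMAS AND PROOFS =====

-- B's loop of filters is one filter by the conjunction of all the per-character tests.
theorem foldl_filter_eq_filter_all {α β : Type} (q : β → α → Bool) (l : List β) (cs : List α) :
    l.foldl (fun cs pc => cs.filter (q pc)) cs
      = cs.filter (fun x => l.all (fun pc => q pc x)) := by
  induction l generalizing cs with
  | nil => simp
  | cons a l ih =>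
    simp only [List.foldl_cons, ih, List.filter_filter, List.all_cons]
    exact List.filter_congr (fun x _ => by rw [Bool.and_comm])

-- Agreeing with t at every typed position is exactly 'lowered month starts with t'.
theorem narrow_all_eq_startswith (t ml : List Char) :
    ((PySem.List.enumerate t 0).all
      (fun pc => decide (pc.1 < (ml.length : Int)) && (PySem.List.pyGet? ml pc.1 == some pc.2)))
      = PySem.Chars.startswith ml t := by
  apply Bool.eq_iff_iff.mpr
  rw [PySem.Chars.startswith_iff, List.prefix_iff_getElem?, List.all_eq_true]
  constructor
  · intro h i hi
    have := h (0 + (i : Int), t[i]) ((PySem.List.mem_enumerate_iff t 0 _).mpr ⟨i, hi, rfl⟩)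
    simp only [Bool.and_eq_true, decide_eq_true_eq, beq_iff_eq, zero_add,
      PySem.List.pyGet?_natCast] at this
    exact this.2
  · intro h p hp
    obtain ⟨k, hk, rfl⟩ := (PySem.List.mem_enumerate_iff t 0 p).mp hp
    have hg := h k hk
    have hkml : k < ml.length := by
      by_contra hge
      rw [List.getElem?_eq_none_iff.mpr (by omega)] at hg
      simp at hg
    simp only [zero_add, PySem.List.pyGet?_natCast, Bool.and_eq_true, decide_eq_true_eq,
      beq_iff_eq]
    exact ⟨by exact_mod_cast hkml, hg⟩

-- A surviving candidate of exactly the typed length is an exact match, and conversely.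
theorem startswith_and_len_eq (t ml : List Char) :
    (PySem.Chars.startswith ml t && (ml.length == t.length)) = (ml == t) := by
  apply Bool.eq_iff_iff.mpr
  simp only [Bool.and_eq_true, beq_iff_eq, PySem.Chars.startswith_iff]
  constructor
  · rintro ⟨hpre, hlen⟩; exact (List.IsPrefix.eq_of_length hpre hlen.symm).symm
  · rintro rfl; exact ⟨List.prefix_refl ml, rfl⟩

-- String equality is toList equality (both as Bool).
theorem str_beq_eq_toList_beq (s u : String) : (s == u) = (s.toList == u.toList) := by
  apply Bool.eq_iff_iff.mpr
  simp only [beq_iff_eq]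
  refine ⟨fun h => h ▸ rfl, fun h => ?_⟩
  have h2 := congrArg String.ofList h
  simpa using h2

-- ===== VERDICT (by name: the statement is the Claim_ definition above) =====
theorem month_from_typed_py_spec : Claim_equal_month_from_typed_py := by
  intro typed months_list _
  unfold Spec_month_from_typed_py month_from_typed_py month_from_typed_py_alt
  by_cases h0 : typed = ""
  · simp [h0]
  · simp only [h0, if_false]
    rw [foldl_filter_eq_filter_all]
    -- name the shared pieces
    set t : List Char := (PySem.Str.lower typed).toList with ht
    have hBpred : ∀ x : Int × List Char,
        ((PySem.List.enumerate t 0).all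
          (fun pc => decide (pc.1 < (x.2.length : Int)) && (PySem.List.pyGet? x.2 pc.1 == some pc.2)))
          = PySem.Chars.startswith x.2 t := fun x => narrow_all_eq_startswith t x.2
    rw [List.filter_congr (fun x _ => hBpred x), List.filter_map]
    -- A's prefix predicate, seen through the pair-lowering map
    have hpa : ((fun p : Int × List Char => PySem.Chars.startswith p.2 t) ∘
          (fun p : Int × String => (p.1, (PySem.Str.lower p.2).toList)))
        = (fun p : Int × String => PySem.Str.startswith (PySem.Str.lower p.2) (PySem.Str.lower typed)) := by
      funext p
      simp [PySem.Str.startswith, ht]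
    rw [hpa]
    set F := (PySem.List.enumerate months_list 0).filter
      (fun p => PySem.Str.startswith (PySem.Str.lower p.2) (PySem.Str.lower typed)) with hF
    simp only [List.length_map]
    by_cases h1 : F.length = 1
    · obtain ⟨a, ha⟩ := List.length_eq_one_iff.mp h1
      simp [ha]
    · simp only [h1, if_false]
      -- exact branch: B filters the survivors by length, A filters afresh by equality
      rw [List.filter_map, List.filter_filter]
      have hpe : ∀ x : Int × String,
          (((fun p : Int × List Char => p.2.length == t.length) ∘
              (fun p : Int × String => (p.1, (PySem.Str.lower p.2).toList))) x
            && PySem.Str.startswith (PySem.Str.lower x.2) (PySem.Str.lower typed))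
          = (PySem.Str.lower x.2 == PySem.Str.lower typed) := by
        intro p
        rw [str_beq_eq_toList_beq]
        rw [← startswith_and_len_eq t ((PySem.Str.lower p.2).toList)]
        simp [PySem.Str.startswith, ht, Bool.and_comm]
      rw [List.filter_congr (fun x _ => hpe x)]
      set E := (PySem.List.enumerate months_list 0).filter
        (fun p => PySem.Str.lower p.2 == PySem.Str.lower typed) with hE
      simp only [List.length_map]
      by_cases h2 : E.length = 1
      · obtain ⟨a, ha⟩ := List.length_eq_one_iff.mp h2
        simp [ha]
      · simp [h2]
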